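-- pv_equiv track=rewrite | github.com/MuhammadAakash/advent-of-code | 2024/Day10/day10.py | calculate_trailhead_ratings
-- ===== SOURCE A (Python) =====
-- def dfs_count_trails(map_data, r, c, memo):
--     """
--     Perform a DFS to count all distinct hiking trails from a given position.
--     Uses memoization to avoid redundant calculations.
--     """
--     rows, cols = len(map_data), len(map_data[0])
--
--     # If this position is memoized, return the stored result
--     if (r, c) in memo:
--         return memo[(r, c)]
--
--     # If this is height 9, it marks the end of a trail
--     if map_data[r][c] == 9:
--         return 1
--
--     # Explore all possible moves
--     total_trails = 0
--     for dr, dc in [(-1, 0), (1, 0), (0, -1), (0, 1)]: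
--         nr, nc = r + dr, c + dc
--         if 0 <= nr < rows and 0 <= nc < cols and map_data[nr][nc] == map_data[r][c] + 1:
--             total_trails += dfs_count_trails(map_data, nr, nc, memo)
--
--     # Store the result in the memoization dictionary
--     memo[(r, c)] = total_trails
--     return total_trails
--
-- def calculate_trailhead_ratings(map_data):
--     """Calculate the total rating of all trailheads."""
--     rows, cols = len(map_data), len(map_data[0])
--     total_rating = 0
--     memo = {}  # To store intermediate results of DFS
--
--     for r in range(rows):
--         for c in range(cols):
--             if map_data[r][c] == 0:  # Found a trailhead
--                 total_rating += dfs_count_trails(map_data, r, c, memo)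
--
--     return total_rating
-- ===== SOURCE B (Python) =====
-- def calculate_trailhead_ratings(map_data):
--     """Calculate the total rating of all trailheads (bottom-up DP by height)."""
--     rows, cols = len(map_data), len(map_data[0])
--     dp = {}
--     for h in range(9, -1, -1):
--         for r in range(rows):
--             for c in range(cols):
--                 if map_data[r][c] == h:
--                     if h == 9:
--                         dp[(r, c)] = 1
--                     else:
--                         dp[(r, c)] = sum(
--                             dp.get((r + dr, c + dc), 0)
--                             for dr, dc in ((-1, 0), (1, 0), (0, -1), (0, 1))
--                             if 0 <= r + dr < rows and 0 <= c + dc < cols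
--                             and map_data[r + dr][c + dc] == h + 1)
--     return sum(dp.get((r, c), 0)
--                for r in range(rows) for c in range(cols)
--                if map_data[r][c] == 0)
-- ===== Notes on version B (the rewrite author's own statement) =====
-- stated objective: alternative
-- what changed: Replaces A's memoized recursive DFS from each trailhead with a bottom-up dynamic-programming table: cells are processed bucket-by-bucket in descending height order (9 down to 0), each cell's count is the sum of its already-finalized higher neighbours, and the height-0 entries are summed.
import Mathlib
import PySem

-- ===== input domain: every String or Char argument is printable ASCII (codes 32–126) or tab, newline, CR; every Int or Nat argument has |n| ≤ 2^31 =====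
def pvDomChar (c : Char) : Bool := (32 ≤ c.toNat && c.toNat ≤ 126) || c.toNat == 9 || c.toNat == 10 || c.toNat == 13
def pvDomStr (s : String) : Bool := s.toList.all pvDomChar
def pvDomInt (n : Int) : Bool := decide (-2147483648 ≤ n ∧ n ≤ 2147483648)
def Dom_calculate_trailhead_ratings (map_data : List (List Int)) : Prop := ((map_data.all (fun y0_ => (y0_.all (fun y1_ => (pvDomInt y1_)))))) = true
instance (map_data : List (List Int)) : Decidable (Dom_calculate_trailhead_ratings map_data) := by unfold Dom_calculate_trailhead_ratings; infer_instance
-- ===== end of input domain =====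

-- B replaces A's memoized recursive DFS by a bottom-up DP table filled in descending-height order; same results, same cost.

-- ===== PORT A =====
-- shared indexing helper: map_data[r][c] for indices the guards have shown to be in range
-- (getD is exact there; out-of-range Python access raises and is excluded by Pre_)
def pvGetCell (m : List (List Int)) (r c : Nat) : Int := (m.getD r []).getD c 0

-- `fuel` only makes the recursion total: every call from calculate_trailhead_ratings starts at a
-- height-0 cell and heights strictly increase to at most 9, so fuel 10 is never exhausted there.
def dfs_count_trails (map_data : List (List Int)) (r c : Int)
    (memo : PySem.Dict (Int × Int) Int) (fuel : Nat) : Int × PySem.Dict (Int × Int) Int :=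
  let rows : Int := map_data.length
  let cols : Int := (map_data.headD []).length
  match PySem.Dict.get? memo (r, c) with
  | some v => (v, memo)
  | none =>
    if pvGetCell map_data r.toNat c.toNat = 9 then (1, memo)
    else
      match fuel with
      | 0 => (0, memo)
      | fuel + 1 =>
        let res := [((-1 : Int), (0 : Int)), (1, 0), (0, -1), (0, 1)].foldl
          (fun (st : Int × PySem.Dict (Int × Int) Int) d =>
            let nr := r + d.1
            let nc := c + d.2
            if 0 ≤ nr ∧ nr < rows ∧ 0 ≤ nc ∧ nc < cols ∧
                pvGetCell map_data nr.toNat nc.toNat = pvGetCell map_data r.toNat c.toNat + 1 then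
              let p := dfs_count_trails map_data nr nc st.2 fuel
              (st.1 + p.1, p.2)
            else st) (0, memo)
        (res.1, PySem.Dict.insert res.2 (r, c) res.1)
termination_by fuel

def calculate_trailhead_ratings (map_data : List (List Int)) : Int :=
  let rows := map_data.length
  let cols := (map_data.headD []).length
  let res := (List.range rows).foldl
    (fun (st : Int × PySem.Dict (Int × Int) Int) r =>
      (List.range cols).foldl
        (fun st c =>
          if pvGetCell map_data r c = 0 then
            let p := dfs_count_trails map_data (r : Int) (c : Int) st.2 10
            (st.1 + p.1, p.2)
          else st) st) ((0 : Int), PySem.Dict.empty)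
  res.1

-- ===== PORT B =====
-- sum(dp.get(...) for ... if in-range and height h+1) of Source B
def trail_nb_sum (map_data : List (List Int)) (dp : PySem.Dict (Int × Int) Int)
    (r c : Nat) (h : Int) : Int :=
  [((-1 : Int), (0 : Int)), (1, 0), (0, -1), (0, 1)].foldl
    (fun s d =>
      let nr := (r : Int) + d.1
      let nc := (c : Int) + d.2
      if 0 ≤ nr ∧ nr < (map_data.length : Int) ∧ 0 ≤ nc ∧ nc < ((map_data.headD []).length : Int) ∧
          pvGetCell map_data nr.toNat nc.toNat = h + 1 then
        s + PySem.Dict.getD dp (nr, nc) 0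
      else s) 0

-- one bucket of Source B's outer loop: fill dp at every cell of height h
def trail_dp_pass (map_data : List (List Int)) (dp : PySem.Dict (Int × Int) Int)
    (h : Int) : PySem.Dict (Int × Int) Int :=
  (List.range map_data.length).foldl
    (fun dp r =>
      (List.range (map_data.headD []).length).foldl
        (fun dp c =>
          if pvGetCell map_data r c = h then
            PySem.Dict.insert dp ((r : Int), (c : Int))
              (if h = 9 then 1 else trail_nb_sum map_data dp r c h)
          else dp) dp) dp

def calculate_trailhead_ratings_alt (map_data : List (List Int)) : Int :=
  let rows := map_data.length
  let cols := (map_data.headD []).length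
  let dp := (PySem.List.pyRange 9 (-1) (-1)).foldl (trail_dp_pass map_data) PySem.Dict.empty
  (List.range rows).foldl
    (fun t r =>
      (List.range cols).foldl
        (fun t c =>
          if pvGetCell map_data r c = 0 then t + PySem.Dict.getD dp ((r : Int), (c : Int)) 0
          else t) t) 0

-- ===== PRECONDITION & SPEC =====
-- Pre_ excludes exactly the inputs on which the Python A raises IndexError: an empty map
-- (len(map_data[0])) and a row shorter than row 0 (map_data[r][c] with c < cols).
def Pre_calculate_trailhead_ratings (map_data : List (List Int)) : Prop :=
  map_data ≠ [] ∧ ∀ row ∈ map_data, (map_data.headD []).length ≤ row.length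
instance (map_data : List (List Int)) : Decidable (Pre_calculate_trailhead_ratings map_data) := by
  unfold Pre_calculate_trailhead_ratings; infer_instance
def pvWitness_calculate_trailhead_ratings : List (List Int) :=
  [[0, 1, 2, 3, 4, 5, 6, 7, 8, 9], [1, 2, 3, 4, 5, 6, 7, 8, 9, 9]]

def Spec_calculate_trailhead_ratings (map_data : List (List Int)) (out : Int) : Prop := out = calculate_trailhead_ratings_alt map_data
instance (map_data : List (List Int)) (out : Int) : Decidable (Spec_calculate_trailhead_ratings map_data out) := by unfold Spec_calculate_trailhead_ratings; infer_instance

-- ===== CLAIM (what is proved, stated in full; the proofs are below) =====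
def Claim_equal_calculate_trailhead_ratings : Prop := ∀ (map_data : List (List Int)), Dom_calculate_trailhead_ratings map_data → Pre_calculate_trailhead_ratings map_data → Spec_calculate_trailhead_ratings map_data (calculate_trailhead_ratings map_data)

-- ===== LEMMAS AND PROOFS =====

def pvNbOkB (m : List (List Int)) (r c : Nat) (dr dc : Int) : Bool :=
  decide (0 ≤ (r : Int) + dr ∧ (r : Int) + dr < (m.length : Int) ∧
    0 ≤ (c : Int) + dc ∧ (c : Int) + dc < ((m.headD []).length : Int) ∧
    pvGetCell m ((r : Int) + dr).toNat ((c : Int) + dc).toNat = pvGetCell m r c + 1)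

def pvPc (m : List (List Int)) (r c : Nat) : Nat → Int
  | 0 => if pvGetCell m r c = 9 then 1 else 0
  | (k + 1) =>
    if pvGetCell m r c = 9 then 1 else
      (if pvNbOkB m r c (-1) 0 then pvPc m ((r : Int) + (-1)).toNat ((c : Int) + 0).toNat k else 0) +
      (if pvNbOkB m r c 1 0 then pvPc m ((r : Int) + 1).toNat ((c : Int) + 0).toNat k else 0) +
      (if pvNbOkB m r c 0 (-1) then pvPc m ((r : Int) + 0).toNat ((c : Int) + (-1)).toNat k else 0) +
      (if pvNbOkB m r c 0 1 then pvPc m ((r : Int) + 0).toNat ((c : Int) + 1).toNat k else 0)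

def pvCount (m : List (List Int)) (r c : Nat) : Int := pvPc m r c 10

lemma pvNbOk_height {m : List (List Int)} {r c : Nat} {dr dc : Int}
    (h : pvNbOkB m r c dr dc = true) :
    pvGetCell m ((r : Int) + dr).toNat ((c : Int) + dc).toNat = pvGetCell m r c + 1 := by
  simp only [pvNbOkB, decide_eq_true_eq] at h
  exact h.2.2.2.2

lemma pvPc_stable (m : List (List Int)) :
    ∀ (k : Nat) (r c : Nat), (9 - pvGetCell m r c).toNat ≤ k →
      pvPc m r c (k + 1) = pvPc m r c k := by
  intro k
  induction k with
  | zero =>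
    intro r c hk
    by_cases h9 : pvGetCell m r c = 9
    · simp [pvPc, h9]
    · have hge : 10 ≤ pvGetCell m r c := by omega
      have hterm : ∀ (dr dc : Int),
          (if pvNbOkB m r c dr dc then pvPc m ((r : Int) + dr).toNat ((c : Int) + dc).toNat 0 else 0) = 0 := by
        intro dr dc
        by_cases hb : pvNbOkB m r c dr dc = true
        · have := pvNbOk_height hb
          rw [if_pos hb, pvPc, if_neg (by omega)]
        · simp [hb]
      conv_lhs => rw [pvPc]
      conv_rhs => rw [pvPc]
      rw [if_neg h9, if_neg h9, hterm, hterm, hterm, hterm]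
      norm_num
  | succ k ih =>
    intro r c hk
    by_cases h9 : pvGetCell m r c = 9
    · simp [pvPc, h9]
    · have hterm : ∀ (dr dc : Int),
          (if pvNbOkB m r c dr dc then pvPc m ((r : Int) + dr).toNat ((c : Int) + dc).toNat (k + 1) else 0) =
          (if pvNbOkB m r c dr dc then pvPc m ((r : Int) + dr).toNat ((c : Int) + dc).toNat k else 0) := by
        intro dr dc
        by_cases hb : pvNbOkB m r c dr dc = true
        · have hh := pvNbOk_height hb
          rw [if_pos hb, if_pos hb, ih _ _ (by omega)]
        · simp [hb]
      conv_lhs => rw [pvPc]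
      conv_rhs => rw [pvPc]
      rw [if_neg h9, if_neg h9, hterm, hterm, hterm, hterm]

lemma pvCount_nine {m : List (List Int)} {r c : Nat} (h : pvGetCell m r c = 9) :
    pvCount m r c = 1 := by
  rw [pvCount, pvPc, if_pos h]

lemma pvCount_eq {m : List (List Int)} {r c : Nat}
    (h0 : 0 ≤ pvGetCell m r c) (h9 : pvGetCell m r c ≠ 9) :
    pvCount m r c =
      (if pvNbOkB m r c (-1) 0 then pvCount m ((r : Int) + (-1)).toNat ((c : Int) + 0).toNat else 0) +
      (if pvNbOkB m r c 1 0 then pvCount m ((r : Int) + 1).toNat ((c : Int) + 0).toNat else 0) +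
      (if pvNbOkB m r c 0 (-1) then pvCount m ((r : Int) + 0).toNat ((c : Int) + (-1)).toNat else 0) +
      (if pvNbOkB m r c 0 1 then pvCount m ((r : Int) + 0).toNat ((c : Int) + 1).toNat else 0) := by
  have hterm : ∀ (dr dc : Int),
      (if pvNbOkB m r c dr dc then pvPc m ((r : Int) + dr).toNat ((c : Int) + dc).toNat 9 else 0) =
      (if pvNbOkB m r c dr dc then pvCount m ((r : Int) + dr).toNat ((c : Int) + dc).toNat else 0) := by
    intro dr dc
    by_cases hb : pvNbOkB m r c dr dc = true
    · have hh := pvNbOk_height hb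
      rw [if_pos hb, if_pos hb, pvCount, pvPc_stable m 9 _ _ (by omega)]
    · simp [hb]
  rw [pvCount, show (10 : Nat) = 9 + 1 from rfl]
  conv_lhs => rw [pvPc]
  rw [if_neg h9, hterm, hterm, hterm, hterm]

def InvA (m : List (List Int)) (memo : PySem.Dict (Int × Int) Int) : Prop :=
  ∀ ri ci v, PySem.Dict.get? memo (ri, ci) = some v →
    0 ≤ ri ∧ 0 ≤ ci ∧ v = pvCount m ri.toNat ci.toNat

-- a fold whose step adds T d to the accumulator and preserves P on the state
lemma foldl_step_sum {σ : Type} (P : σ → Prop) (G : (Int × σ) → (Int × Int) → (Int × σ))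
    (T : Int × Int → Int) :
    ∀ (ds : List (Int × Int)) (st : Int × σ),
      (∀ (st' : Int × σ) (d : Int × Int), d ∈ ds → P st'.2 →
        (G st' d).1 = st'.1 + T d ∧ P (G st' d).2) →
      P st.2 →
      (ds.foldl G st).1 = st.1 + (ds.map T).sum ∧ P (ds.foldl G st).2 := by
  intro ds
  induction ds with
  | nil => intro st _ hP; exact ⟨by simp, hP⟩
  | cons d ds ihd =>
    intro st hpt hP
    obtain ⟨h1, h2⟩ := hpt st d (by simp) hP
    obtain ⟨h3, h4⟩ := ihd (G st d) (fun st' d' hd' => hpt st' d' (by simp [hd'])) h2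
    simp only [List.foldl_cons, List.map_cons, List.sum_cons]
    exact ⟨by rw [h3, h1]; ring, h4⟩

lemma dfs_spec (m : List (List Int)) :
    ∀ (fuel : Nat) (rn cn : Nat) (memo : PySem.Dict (Int × Int) Int),
      0 ≤ pvGetCell m rn cn → pvGetCell m rn cn ≤ 9 →
      (9 - pvGetCell m rn cn).toNat < fuel → InvA m memo →
      (dfs_count_trails m (rn : Int) (cn : Int) memo fuel).1 = pvCount m rn cn ∧
      InvA m (dfs_count_trails m (rn : Int) (cn : Int) memo fuel).2 := by
  intro fuel
  induction fuel with
  | zero => intro rn cn memo h0 h9 hf hI; omega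
  | succ f ih =>
    intro rn cn memo h0 h9 hf hI
    rw [dfs_count_trails]
    cases hget : PySem.Dict.get? memo ((rn : Int), (cn : Int)) with
    | some v =>
      obtain ⟨_, _, hv⟩ := hI _ _ _ hget
      simp only [Int.toNat_natCast] at hv
      simp [hv, hI]
    | none =>
      simp only [Int.toNat_natCast]
      by_cases hnine : pvGetCell m rn cn = 9
      · simp [hnine, pvCount_nine hnine, hI]
      · rw [if_neg hnine]
        dsimp only
        have hpt : ∀ (st : Int × PySem.Dict (Int × Int) Int) (d : Int × Int),
            d ∈ [((-1 : Int), (0 : Int)), (1, 0), (0, -1), (0, 1)] → InvA m st.2 →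
            ((fun (st : Int × PySem.Dict (Int × Int) Int) (d : Int × Int) =>
              if 0 ≤ (rn : Int) + d.1 ∧ (rn : Int) + d.1 < (m.length : Int) ∧
                  0 ≤ (cn : Int) + d.2 ∧ (cn : Int) + d.2 < ((m.headD []).length : Int) ∧
                  pvGetCell m ((rn : Int) + d.1).toNat ((cn : Int) + d.2).toNat =
                    pvGetCell m rn cn + 1 then
                ((st.1 + (dfs_count_trails m ((rn : Int) + d.1) ((cn : Int) + d.2) st.2 f).1,
                  (dfs_count_trails m ((rn : Int) + d.1) ((cn : Int) + d.2) st.2 f).2))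
              else st) st d).1 =
              st.1 + (if pvNbOkB m rn cn d.1 d.2 then
                pvCount m ((rn : Int) + d.1).toNat ((cn : Int) + d.2).toNat else 0) ∧
            InvA m ((fun (st : Int × PySem.Dict (Int × Int) Int) (d : Int × Int) =>
              if 0 ≤ (rn : Int) + d.1 ∧ (rn : Int) + d.1 < (m.length : Int) ∧
                  0 ≤ (cn : Int) + d.2 ∧ (cn : Int) + d.2 < ((m.headD []).length : Int) ∧
                  pvGetCell m ((rn : Int) + d.1).toNat ((cn : Int) + d.2).toNat =
                    pvGetCell m rn cn + 1 then
                ((st.1 + (dfs_count_trails m ((rn : Int) + d.1) ((cn : Int) + d.2) st.2 f).1,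
                  (dfs_count_trails m ((rn : Int) + d.1) ((cn : Int) + d.2) st.2 f).2))
              else st) st d).2 := by
          intro st d _ hst
          dsimp only
          by_cases hc : 0 ≤ (rn : Int) + d.1 ∧ (rn : Int) + d.1 < (m.length : Int) ∧
              0 ≤ (cn : Int) + d.2 ∧ (cn : Int) + d.2 < ((m.headD []).length : Int) ∧
              pvGetCell m ((rn : Int) + d.1).toNat ((cn : Int) + d.2).toNat = pvGetCell m rn cn + 1
          · have hb : pvNbOkB m rn cn d.1 d.2 = true := by
              simp only [pvNbOkB, decide_eq_true_eq]; exact hc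
            obtain ⟨h1, h2, h3, h4, h5⟩ := hc
            have hr' : ((rn : Int) + d.1) = ((((rn : Int) + d.1).toNat : Nat) : Int) := by omega
            have hc' : ((cn : Int) + d.2) = ((((cn : Int) + d.2).toNat : Nat) : Int) := by omega
            have hrec := ih ((rn : Int) + d.1).toNat ((cn : Int) + d.2).toNat st.2
              (by omega) (by omega) (by omega) hst
            rw [← hr', ← hc'] at hrec
            rw [if_pos ⟨h1, h2, h3, h4, h5⟩, if_pos hb]
            exact ⟨by rw [hrec.1], hrec.2⟩
          · have hb : ¬ (pvNbOkB m rn cn d.1 d.2 = true) := by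
              simp only [pvNbOkB, decide_eq_true_eq]; exact hc
            rw [if_neg hc, if_neg hb, add_zero]
            exact ⟨rfl, hst⟩
        obtain ⟨hf1, hf2⟩ := foldl_step_sum (InvA m) _ _
          [((-1 : Int), (0 : Int)), (1, 0), (0, -1), (0, 1)] ((0 : Int), memo) hpt hI
        have hsum : (0 : Int) +
            ([((-1 : Int), (0 : Int)), (1, 0), (0, -1), (0, 1)].map
              (fun d : Int × Int => if pvNbOkB m rn cn d.1 d.2 then
                pvCount m ((rn : Int) + d.1).toNat ((cn : Int) + d.2).toNat else 0)).sum =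
            pvCount m rn cn := by
          simp only [List.map_cons, List.map_nil, List.sum_cons, List.sum_nil]
          rw [pvCount_eq h0 hnine]; ring
        rw [hf1, hsum]
        refine ⟨rfl, ?_⟩
        intro ri ci v hv
        rw [PySem.Dict.get?_insert] at hv
        by_cases hk : ((ri, ci) : Int × Int) = ((rn : Int), (cn : Int))
        · rw [if_pos hk] at hv
          have hv' : v = pvCount m rn cn := by
            have := Option.some.inj hv
            omega
          obtain ⟨hri, hci⟩ := Prod.mk.injEq .. ▸ hk
          refine ⟨by omega, by omega, ?_⟩
          rw [hv', hri, hci]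
          simp only [Int.toNat_natCast]
        · rw [if_neg hk] at hv
          exact hf2 _ _ _ hv

def pvTotal (m : List (List Int)) : Int :=
  ((List.range m.length).map (fun r =>
    ((List.range (m.headD []).length).map (fun c =>
      if pvGetCell m r c = 0 then pvCount m r c else 0)).sum)).sum

lemma loopA_inner (m : List (List Int)) (r : Nat) :
    ∀ (cs : List Nat) (t : Int) (memo : PySem.Dict (Int × Int) Int), InvA m memo →
      (cs.foldl (fun (st : Int × PySem.Dict (Int × Int) Int) c =>
        if pvGetCell m r c = 0 then
          (st.1 + (dfs_count_trails m (r : Int) (c : Int) st.2 10).1,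
            (dfs_count_trails m (r : Int) (c : Int) st.2 10).2)
        else st) (t, memo)).1 =
        t + (cs.map (fun c => if pvGetCell m r c = 0 then pvCount m r c else 0)).sum ∧
      InvA m (cs.foldl (fun (st : Int × PySem.Dict (Int × Int) Int) c =>
        if pvGetCell m r c = 0 then
          (st.1 + (dfs_count_trails m (r : Int) (c : Int) st.2 10).1,
            (dfs_count_trails m (r : Int) (c : Int) st.2 10).2)
        else st) (t, memo)).2 := by
  intro cs
  induction cs with
  | nil => intro t memo hI; exact ⟨by simp, hI⟩
  | cons c cs ihc =>
    intro t memo hI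
    simp only [List.foldl_cons, List.map_cons, List.sum_cons]
    by_cases hz : pvGetCell m r c = 0
    · have hd := dfs_spec m 10 r c memo (by rw [hz]) (by rw [hz]; norm_num) (by rw [hz]; norm_num) hI
      rw [if_pos hz, if_pos hz]
      obtain ⟨h1, h2⟩ := ihc (t + (dfs_count_trails m (r : Int) (c : Int) memo 10).1)
        (dfs_count_trails m (r : Int) (c : Int) memo 10).2 hd.2
      exact ⟨by rw [h1, hd.1]; ring, h2⟩
    · rw [if_neg hz, if_neg hz]
      obtain ⟨h1, h2⟩ := ihc t memo hI
      exact ⟨by rw [h1]; ring, h2⟩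

lemma loopA_outer (m : List (List Int)) :
    ∀ (rs : List Nat) (t : Int) (memo : PySem.Dict (Int × Int) Int), InvA m memo →
      (rs.foldl (fun (st : Int × PySem.Dict (Int × Int) Int) r =>
        (List.range (m.headD []).length).foldl (fun st c =>
          if pvGetCell m r c = 0 then
            (st.1 + (dfs_count_trails m (r : Int) (c : Int) st.2 10).1,
              (dfs_count_trails m (r : Int) (c : Int) st.2 10).2)
          else st) st) (t, memo)).1 =
        t + (rs.map (fun r => ((List.range (m.headD []).length).map (fun c =>
          if pvGetCell m r c = 0 then pvCount m r c else 0)).sum)).sum := by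
  intro rs
  induction rs with
  | nil => intro t memo hI; simp
  | cons r rs ihr =>
    intro t memo hI
    simp only [List.foldl_cons, List.map_cons, List.sum_cons]
    obtain ⟨h1, h2⟩ := loopA_inner m r (List.range (m.headD []).length) t memo hI
    have hrec := ihr (List.foldl (fun (st : Int × PySem.Dict (Int × Int) Int) c =>
        if pvGetCell m r c = 0 then
          (st.1 + (dfs_count_trails m (r : Int) (c : Int) st.2 10).1,
            (dfs_count_trails m (r : Int) (c : Int) st.2 10).2)
        else st) (t, memo) (List.range (m.headD []).length)).1
      (List.foldl (fun (st : Int × PySem.Dict (Int × Int) Int) c =>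
        if pvGetCell m r c = 0 then
          (st.1 + (dfs_count_trails m (r : Int) (c : Int) st.2 10).1,
            (dfs_count_trails m (r : Int) (c : Int) st.2 10).2)
        else st) (t, memo) (List.range (m.headD []).length)).2 h2
    rw [Prod.mk.eta] at hrec
    rw [hrec, h1]
    ring

lemma A_eq_total (m : List (List Int)) : calculate_trailhead_ratings m = pvTotal m := by
  rw [calculate_trailhead_ratings]
  have hI : InvA m PySem.Dict.empty := by
    intro ri ci v hv
    rw [PySem.Dict.get?_empty] at hv
    exact absurd hv (by simp)
  have := loopA_outer m (List.range m.length) 0 PySem.Dict.empty hI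
  rw [pvTotal]
  dsimp only
  rw [this]
  ring

def QB (m : List (List Int)) (h : Int) (dp : PySem.Dict (Int × Int) Int) : Prop :=
  ∀ rn cn : Nat, rn < m.length → cn < (m.headD []).length →
    h ≤ pvGetCell m rn cn → pvGetCell m rn cn ≤ 9 →
    PySem.Dict.getD dp ((rn : Int), (cn : Int)) 0 = pvCount m rn cn

lemma nbsum_eq (m : List (List Int)) (dp : PySem.Dict (Int × Int) Int) (r c : Nat) (h : Int)
    (hQ : QB m (h + 1) dp) (hh0 : 0 ≤ h) (hh9 : h ≤ 8) (hcell : pvGetCell m r c = h) :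
    trail_nb_sum m dp r c h = pvCount m r c := by
  rw [pvCount_eq (by omega) (by omega)]
  rw [trail_nb_sum]
  simp only [List.foldl_cons, List.foldl_nil]
  have hterm : ∀ (dr dc : Int) (s : Int),
      (if 0 ≤ (r : Int) + dr ∧ (r : Int) + dr < (m.length : Int) ∧
          0 ≤ (c : Int) + dc ∧ (c : Int) + dc < ((m.headD []).length : Int) ∧
          pvGetCell m ((r : Int) + dr).toNat ((c : Int) + dc).toNat = h + 1 then
        s + PySem.Dict.getD dp ((r : Int) + dr, (c : Int) + dc) 0
      else s) =
      s + (if pvNbOkB m r c dr dc then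
        pvCount m ((r : Int) + dr).toNat ((c : Int) + dc).toNat else 0) := by
    intro dr dc s
    by_cases hok : 0 ≤ (r : Int) + dr ∧ (r : Int) + dr < (m.length : Int) ∧
        0 ≤ (c : Int) + dc ∧ (c : Int) + dc < ((m.headD []).length : Int) ∧
        pvGetCell m ((r : Int) + dr).toNat ((c : Int) + dc).toNat = h + 1
    · have hb : pvNbOkB m r c dr dc = true := by
        simp only [pvNbOkB, decide_eq_true_eq, hcell]; exact hok
      have h1 := hok.1
      have h2 := hok.2.1
      have h3 := hok.2.2.1
      have h4 := hok.2.2.2.1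
      have h5 := hok.2.2.2.2
      have hkey : (((r : Int) + dr, (c : Int) + dc) : Int × Int) =
          ((((r : Int) + dr).toNat : Int), (((c : Int) + dc).toNat : Int)) := by
        simp only [Prod.mk.injEq]
        constructor <;> omega
      have hget := hQ ((r : Int) + dr).toNat ((c : Int) + dc).toNat
        (by omega) (by omega) (by omega) (by omega)
      rw [if_pos hok, if_pos hb, hkey, hget]
    · have hb : ¬ (pvNbOkB m r c dr dc = true) := by
        simp only [pvNbOkB, decide_eq_true_eq, hcell]; exact hok
      rw [if_neg hok, if_neg hb, add_zero]
  rw [hterm, hterm, hterm, hterm]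
  ring

lemma QB_insert (m : List (List Int)) (h : Int) (dp : PySem.Dict (Int × Int) Int)
    (r c : Nat) (v : Int) (hcell : pvGetCell m r c = h) (hQ : QB m (h + 1) dp) :
    QB m (h + 1) (PySem.Dict.insert dp ((r : Int), (c : Int)) v) := by
  intro rn cn hr hc hlo hhi
  rw [PySem.Dict.getD_insert]
  by_cases hk : (((rn : Int), (cn : Int)) : Int × Int) = (((r : Int), (c : Int)) : Int × Int)
  · exfalso
    obtain ⟨hk1, hk2⟩ := Prod.mk.injEq .. ▸ hk
    have hrn : rn = r := by omega
    have hcn : cn = c := by omega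
    rw [hrn, hcn, hcell] at hlo
    omega
  · rw [if_neg hk]
    exact hQ rn cn hr hc hlo hhi

lemma passB_inner (m : List (List Int)) (h : Int) (r : Nat)
    (hh0 : 0 ≤ h) (hh9 : h ≤ 9) :
    ∀ (cs : List Nat) (dp : PySem.Dict (Int × Int) Int), QB m (h + 1) dp →
      QB m (h + 1) (cs.foldl (fun dp c =>
        if pvGetCell m r c = h then
          PySem.Dict.insert dp ((r : Int), (c : Int))
            (if h = 9 then 1 else trail_nb_sum m dp r c h)
        else dp) dp) ∧
      (∀ rn cn : Nat, rn < m.length → cn < (m.headD []).length → pvGetCell m rn cn = h →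
        (PySem.Dict.getD dp ((rn : Int), (cn : Int)) 0 = pvCount m rn cn ∨ (rn = r ∧ cn ∈ cs)) →
        PySem.Dict.getD (cs.foldl (fun dp c =>
          if pvGetCell m r c = h then
            PySem.Dict.insert dp ((r : Int), (c : Int))
              (if h = 9 then 1 else trail_nb_sum m dp r c h)
          else dp) dp) ((rn : Int), (cn : Int)) 0 = pvCount m rn cn) := by
  intro cs
  induction cs with
  | nil =>
    intro dp hQ
    refine ⟨hQ, ?_⟩
    intro rn cn _ _ _ hd
    rcases hd with hd | ⟨_, hmem⟩
    · exact hd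
    · simp at hmem
  | cons c cs ihc =>
    intro dp hQ
    simp only [List.foldl_cons]
    -- the state after processing cell (r, c)
    by_cases hg : pvGetCell m r c = h
    · rw [if_pos hg]
      have hval : (if h = 9 then (1 : Int) else trail_nb_sum m dp r c h) = pvCount m r c := by
        by_cases h9 : h = 9
        · rw [if_pos h9, pvCount_nine (by omega)]
        · rw [if_neg h9, nbsum_eq m dp r c h hQ hh0 (by omega) hg]
      have hQ1 := QB_insert m h dp r c (if h = 9 then 1 else trail_nb_sum m dp r c h) hg hQ
      obtain ⟨q1, q2⟩ := ihc _ hQ1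
      refine ⟨q1, ?_⟩
      intro rn cn hr hc hcell hd
      apply q2 rn cn hr hc hcell
      rcases hd with hd | ⟨hrn, hmem⟩
      · left
        rw [PySem.Dict.getD_insert]
        by_cases hk : (((rn : Int), (cn : Int)) : Int × Int) = (((r : Int), (c : Int)) : Int × Int)
        · obtain ⟨hk1, hk2⟩ := Prod.mk.injEq .. ▸ hk
          have hrn : rn = r := by omega
          have hcn : cn = c := by omega
          rw [if_pos hk, hval, hrn, hcn]
        · rw [if_neg hk]
          exact hd
      · rcases List.mem_cons.mp hmem with hcn | hcn
        · left
          rw [PySem.Dict.getD_insert, if_pos (by rw [hrn, hcn]), hval, hrn, hcn]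
        · right
          exact ⟨hrn, hcn⟩
    · rw [if_neg hg]
      obtain ⟨q1, q2⟩ := ihc dp hQ
      refine ⟨q1, ?_⟩
      intro rn cn hr hc hcell hd
      apply q2 rn cn hr hc hcell
      rcases hd with hd | ⟨hrn, hmem⟩
      · left; exact hd
      · rcases List.mem_cons.mp hmem with hcn | hcn
        · exfalso; rw [hrn, hcn] at hcell; exact hg hcell
        · right; exact ⟨hrn, hcn⟩

lemma passB_outer (m : List (List Int)) (h : Int) (hh0 : 0 ≤ h) (hh9 : h ≤ 9) :
    ∀ (rs : List Nat) (dp : PySem.Dict (Int × Int) Int), QB m (h + 1) dp →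
      QB m (h + 1) (rs.foldl (fun dp r =>
        (List.range (m.headD []).length).foldl (fun dp c =>
          if pvGetCell m r c = h then
            PySem.Dict.insert dp ((r : Int), (c : Int))
              (if h = 9 then 1 else trail_nb_sum m dp r c h)
          else dp) dp) dp) ∧
      (∀ rn cn : Nat, rn < m.length → cn < (m.headD []).length → pvGetCell m rn cn = h →
        (PySem.Dict.getD dp ((rn : Int), (cn : Int)) 0 = pvCount m rn cn ∨ rn ∈ rs) →
        PySem.Dict.getD (rs.foldl (fun dp r =>
          (List.range (m.headD []).length).foldl (fun dp c =>
            if pvGetCell m r c = h then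
              PySem.Dict.insert dp ((r : Int), (c : Int))
                (if h = 9 then 1 else trail_nb_sum m dp r c h)
            else dp) dp) dp) ((rn : Int), (cn : Int)) 0 = pvCount m rn cn) := by
  intro rs
  induction rs with
  | nil =>
    intro dp hQ
    refine ⟨hQ, ?_⟩
    intro rn cn _ _ _ hd
    rcases hd with hd | hmem
    · exact hd
    · simp at hmem
  | cons r rs ihr =>
    intro dp hQ
    simp only [List.foldl_cons]
    obtain ⟨p1, p2⟩ := passB_inner m h r hh0 hh9 (List.range (m.headD []).length) dp hQ
    obtain ⟨q1, q2⟩ := ihr _ p1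
    refine ⟨q1, ?_⟩
    intro rn cn hr hc hcell hd
    apply q2 rn cn hr hc hcell
    rcases hd with hd | hmem
    · left
      exact p2 rn cn hr hc hcell (Or.inl hd)
    · rcases List.mem_cons.mp hmem with hrn | hrn
      · left
        exact p2 rn cn hr hc hcell (Or.inr ⟨hrn, List.mem_range.mpr hc⟩)
      · right
        exact hrn

lemma passB_spec (m : List (List Int)) (h h' : Int) (hh0 : 0 ≤ h) (hh9 : h ≤ 9)
    (hsucc : h' = h + 1) (dp : PySem.Dict (Int × Int) Int) (hQ : QB m h' dp) :
    QB m h (trail_dp_pass m dp h) := by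
  subst hsucc
  rw [trail_dp_pass]
  obtain ⟨q1, q2⟩ := passB_outer m h hh0 hh9 (List.range m.length) dp hQ
  intro rn cn hr hc hlo hhi
  by_cases heq : pvGetCell m rn cn = h
  · exact q2 rn cn hr hc heq (Or.inr (List.mem_range.mpr hr))
  · exact q1 rn cn hr hc (by omega) hhi

lemma loopB_inner (m : List (List Int)) (dp : PySem.Dict (Int × Int) Int)
    (hQ : QB m 0 dp) (r : Nat) (hr : r < m.length) :
    ∀ (cs : List Nat) (t : Int), (∀ c ∈ cs, c < (m.headD []).length) →
      cs.foldl (fun t c =>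
        if pvGetCell m r c = 0 then t + PySem.Dict.getD dp ((r : Int), (c : Int)) 0 else t) t =
      t + (cs.map (fun c => if pvGetCell m r c = 0 then pvCount m r c else 0)).sum := by
  intro cs
  induction cs with
  | nil => intro t _; simp
  | cons c cs ihc =>
    intro t hb
    simp only [List.foldl_cons, List.map_cons, List.sum_cons]
    rw [ihc _ (fun c' hc' => hb c' (List.mem_cons_of_mem _ hc'))]
    by_cases hz : pvGetCell m r c = 0
    · rw [if_pos hz, if_pos hz,
        hQ r c hr (hb c (List.mem_cons_self ..)) (by omega) (by omega)]
      ring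
    · rw [if_neg hz, if_neg hz]
      ring

lemma loopB_outer (m : List (List Int)) (dp : PySem.Dict (Int × Int) Int)
    (hQ : QB m 0 dp) :
    ∀ (rs : List Nat) (t : Int), (∀ r ∈ rs, r < m.length) →
      rs.foldl (fun t r =>
        (List.range (m.headD []).length).foldl (fun t c =>
          if pvGetCell m r c = 0 then t + PySem.Dict.getD dp ((r : Int), (c : Int)) 0 else t) t) t =
      t + (rs.map (fun r => ((List.range (m.headD []).length).map (fun c =>
        if pvGetCell m r c = 0 then pvCount m r c else 0)).sum)).sum := by
  intro rs
  induction rs with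
  | nil => intro t _; simp
  | cons r rs ihr =>
    intro t hb
    simp only [List.foldl_cons, List.map_cons, List.sum_cons]
    rw [loopB_inner m dp hQ r (hb r (List.mem_cons_self ..)) (List.range (m.headD []).length) t
      (fun c hc => List.mem_range.mp hc)]
    rw [ihr _ (fun r' hr' => hb r' (List.mem_cons_of_mem _ hr'))]
    ring

lemma B_eq_total (m : List (List Int)) : calculate_trailhead_ratings_alt m = pvTotal m := by
  rw [calculate_trailhead_ratings_alt]
  have hrange : PySem.List.pyRange 9 (-1) (-1) = [9, 8, 7, 6, 5, 4, 3, 2, 1, 0] := by decide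
  rw [hrange]
  simp only [List.foldl_cons, List.foldl_nil]
  have q10 : QB m 10 PySem.Dict.empty := by
    intro rn cn _ _ hlo hhi; omega
  have q9 := passB_spec m 9 10 (by norm_num) (by norm_num) (by norm_num) _ q10
  have q8 := passB_spec m 8 9 (by norm_num) (by norm_num) (by norm_num) _ q9
  have q7 := passB_spec m 7 8 (by norm_num) (by norm_num) (by norm_num) _ q8
  have q6 := passB_spec m 6 7 (by norm_num) (by norm_num) (by norm_num) _ q7
  have q5 := passB_spec m 5 6 (by norm_num) (by norm_num) (by norm_num) _ q6
  have q4 := passB_spec m 4 5 (by norm_num) (by norm_num) (by norm_num) _ q5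
  have q3 := passB_spec m 3 4 (by norm_num) (by norm_num) (by norm_num) _ q4
  have q2 := passB_spec m 2 3 (by norm_num) (by norm_num) (by norm_num) _ q3
  have q1 := passB_spec m 1 2 (by norm_num) (by norm_num) (by norm_num) _ q2
  have q0 := passB_spec m 0 1 (by norm_num) (by norm_num) (by norm_num) _ q1
  rw [loopB_outer m _ q0 (List.range m.length) 0 (fun r hr => List.mem_range.mp hr)]
  rw [pvTotal]
  ring

-- ===== VERDICT (by name: the statement is the Claim_ definition above) =====
theorem calculate_trailhead_ratings_spec : Claim_equal_calculate_trailhead_ratings := by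
  intro map_data _ _
  unfold Spec_calculate_trailhead_ratings
  rw [A_eq_total, B_eq_total]
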